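-- pv_equiv track=rewrite | github.com/iwataka/google-code-jam | 2018/round2/falling_balls.py | solve
-- ===== SOURCE A (Python) =====
-- def solve(C, ball_counts):
--     if ball_counts[0] == 0 or ball_counts[-1] == 0:
--         return None, []
--     column_results = [0] * C
--     used_column = -1
--     for c, ball_count in enumerate(ball_counts):
--         if ball_count == 0:
--             continue
--         used_column += 1
--         for _c in range(used_column, used_column + ball_count):
--             column_results[_c] = c - _c
--             used_column = _c
--     row_count = abs(max(column_results, key=abs)) + 1
--     layout = [["."] * C for _ in range(row_count)]
--     for c, column_result in enumerate(column_results):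
--         if column_result == 0:
--             continue
--         dx = column_result // abs(column_result)
--         for i in range(abs(column_result)):
--             layout[i][c + dx * i] = "/" if dx < 0 else "\\"
--     return row_count, layout
-- ===== SOURCE B (Python) =====
-- def solve(C, ball_counts):
--     if ball_counts[0] == 0 or ball_counts[-1] == 0:
--         return None, []
--     targets = [c for c, cnt in enumerate(ball_counts) for _ in range(cnt)]
--     column_results = [0] * C
--     for i, t in enumerate(targets):
--         column_results[i] = t - i
--     row_count = max(map(abs, column_results)) + 1
--
--     def cell(r, x):
--         if x + r < C and column_results[x + r] < 0 and r < -column_results[x + r]: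
--             return "/"
--         if x - r >= 0 and column_results[x - r] > 0 and r < column_results[x - r]:
--             return "\\"
--         return "."
--
--     layout = [[cell(r, x) for x in range(C)] for r in range(row_count)]
--     return row_count, layout
-- ===== Notes on version B (the rewrite author's own statement) =====
-- stated objective: alternative
-- what changed: A's stateful used_column pointer with nested in-place fills and in-place diagonal painting is replaced by building a flat expanded target list once, a single indexed pass for column_results, and a pure per-cell closed formula that computes each layout cell directly instead of mutating the grid.
-- outside the precondition, e.g. on solve(2, [-3, 1]): A returns (1, [['.', '.']]), B returns (2, [['\\', '.'], ['.', '.']])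
import Mathlib
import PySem

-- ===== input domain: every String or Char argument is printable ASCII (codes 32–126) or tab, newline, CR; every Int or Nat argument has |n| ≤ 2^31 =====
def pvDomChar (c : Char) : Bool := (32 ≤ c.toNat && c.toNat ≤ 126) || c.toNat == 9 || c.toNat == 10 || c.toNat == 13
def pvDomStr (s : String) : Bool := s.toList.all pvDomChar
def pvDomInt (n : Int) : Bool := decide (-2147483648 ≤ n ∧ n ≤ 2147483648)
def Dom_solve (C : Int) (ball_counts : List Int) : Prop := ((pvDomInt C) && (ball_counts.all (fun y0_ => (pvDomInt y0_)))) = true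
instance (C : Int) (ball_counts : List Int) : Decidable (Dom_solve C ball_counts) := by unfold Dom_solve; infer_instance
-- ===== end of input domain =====

-- B replaces A's running used_column pointer and in-place diagonal painting with an
-- expand-then-map pass over a flat target list plus a per-cell closed formula for the layout
-- (objective: alternative decomposition; return value identical on Pre_solve).

-- ===== PORT A =====
-- body of A's first loop: state (used_column, column_results)
def fillLoopA (st : Int × List Int) (p : Int × Int) : Int × List Int :=
  if p.2 = 0 then st
  else
    let u := st.1 + 1
    (PySem.List.pyRange u (u + p.2) 1).foldl
      (fun st2 c2 => (c2, PySem.List.pySetD st2.2 c2 (p.1 - c2))) (u, st.2)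

-- body of A's second loop: paints one column's diagonal into the layout
-- body of A's second loop: paints one column's diagonal into the layout
def markLoopA (lay : List (List String)) (p : Int × Int) : List (List String) :=
  if p.2 = 0 then lay
  else
    let dx := PySem.Int.floordiv p.2 |p.2|
    (PySem.List.pyRange 0 |p.2| 1).foldl
      (fun lay2 i =>
        PySem.List.pySetD lay2 i
          (PySem.List.pySetD (PySem.List.pyGetD lay2 i []) (p.1 + dx * i)
            (if dx < 0 then "/" else "\\"))) lay

def solve (C : Int) (ball_counts : List Int) : Option Int × List (List String) :=
  match PySem.List.pyGet? ball_counts 0, PySem.List.pyGet? ball_counts (-1) with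
  | some b0, some bl =>
    if b0 = 0 ∨ bl = 0 then (none, [])
    else
      let col := ((PySem.List.enumerate ball_counts).foldl fillLoopA
        (-1, List.replicate C.toNat 0)).2
      let row_count := |PySem.List.maxD col (fun d => |d|) 0| + 1
      let lay := (PySem.List.enumerate col).foldl markLoopA
        (List.replicate row_count.toNat (List.replicate C.toNat "."))
      (some row_count, lay)
  | _, _ => (none, [])  -- ball_counts[0] raises IndexError on []: outside Pre_solve

-- ===== PORT B =====
-- targets = [c for c, cnt in enumerate(ball_counts) for _ in range(cnt)]
def targetsB (ball_counts : List Int) : List Int :=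
  (PySem.List.enumerate ball_counts).flatMap (fun p => List.replicate p.2.toNat p.1)

-- column_results[i] = targets[i] - i over a [0]*C base
def colB (C : Int) (ts : List Int) : List Int :=
  (PySem.List.enumerate ts).foldl (fun arr p => PySem.List.pySetD arr p.1 (p.2 - p.1))
    (List.replicate C.toNat 0)

-- B's cell(r, x) closed formula
def cellB (C : Int) (col : List Int) (r x : Int) : String :=
  if x + r < C ∧ PySem.List.pyGetD col (x + r) 0 < 0 ∧
      r < -(PySem.List.pyGetD col (x + r) 0) then "/"
  else if 0 ≤ x - r ∧ 0 < PySem.List.pyGetD col (x - r) 0 ∧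
      r < PySem.List.pyGetD col (x - r) 0 then "\\"
  else "."

-- [[cell(r, x) for x in range(C)] for r in range(row_count)]
def mkGrid (rc C : Int) (f : Int → Int → String) : List (List String) :=
  (PySem.List.pyRange 0 rc 1).map (fun r => (PySem.List.pyRange 0 C 1).map (fun x => f r x))

def solve_alt (C : Int) (ball_counts : List Int) : Option Int × List (List String) :=
  match PySem.List.pyGet? ball_counts 0 with
  | none => (none, [])  -- ball_counts[0] raises IndexError on []: outside Pre_solve
  | some b0 =>
    match PySem.List.pyGet? ball_counts (-1) with
    | none => (none, [])
    | some bl =>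
      if b0 = 0 ∨ bl = 0 then (none, [])
      else
        let col := colB C (targetsB ball_counts)
        let row_count := PySem.List.maxD (col.map (fun d => |d|)) (fun y => y) 0 + 1
        (some row_count, mkGrid row_count C (cellB C col))

-- ===== PRECONDITION & SPEC =====
-- Pre_solve excludes (a) inputs where A raises (empty list; or, past the guard, IndexError /
-- ValueError when the counts overfill the C columns or a nonzero count sits at index ≥ C+1),
-- and (b) lists containing a NEGATIVE count: negative ball counts are outside the problem's
-- natural domain, and A's values there (its pointer advances without placing a ball) are an
-- accident of its implementation which B does not mirror.
def Pre_solve (C : Int) (ball_counts : List Int) : Prop :=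
  ball_counts ≠ [] ∧
    (ball_counts.head? = some 0 ∨ ball_counts.getLast? = some 0 ∨
      ((∀ x ∈ ball_counts, 0 ≤ x) ∧ ball_counts.sum ≤ C ∧ (ball_counts.length : Int) ≤ C + 1))
instance (C : Int) (ball_counts : List Int) : Decidable (Pre_solve C ball_counts) := by
  unfold Pre_solve; infer_instance

def pvWitness_solve : Int × List Int := (4, [2, 0, 1, 1])

def Spec_solve (C : Int) (ball_counts : List Int) (out : Option Int × List (List String)) : Prop :=
  out = solve_alt C ball_counts
instance (C : Int) (ball_counts : List Int) (out : Option Int × List (List String)) :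
    Decidable (Spec_solve C ball_counts out) := by unfold Spec_solve; infer_instance

-- ===== CLAIM (what is proved, stated in full; the proofs are below) =====
def Claim_equal_solve : Prop := ∀ (C : Int) (ball_counts : List Int),
  Dom_solve C ball_counts → Pre_solve C ball_counts → Spec_solve C ball_counts (solve C ball_counts)

-- ===== LEMMAS AND PROOFS =====

def assignFrom (arr : List Int) (s : Int) (ts : List Int) : List Int :=
  (PySem.List.enumerate ts s).foldl (fun a p => PySem.List.pySetD a p.1 (p.2 - p.1)) arr

theorem assignFrom_nil (arr : List Int) (s : Int) : assignFrom arr s [] = arr := rfl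
theorem assignFrom_cons (arr : List Int) (s t : Int) (ts : List Int) :
    assignFrom arr s (t :: ts) = assignFrom (PySem.List.pySetD arr s (t - s)) (s + 1) ts := by
  simp [assignFrom, PySem.List.enumerate_cons]

theorem length_assignFrom (arr : List Int) (s : Int) (ts : List Int) :
    (assignFrom arr s ts).length = arr.length := by
  induction ts generalizing arr s with
  | nil => rfl
  | cons t ts ih => rw [assignFrom_cons, ih, PySem.List.length_pySetD]

theorem getD_assignFrom (ts : List Int) (s : Nat) (arr : List Int) (j : Nat)
    (hj : j < arr.length) :
    (assignFrom arr (s : Int) ts).getD j 0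
      = if s ≤ j ∧ j - s < ts.length then ts.getD (j - s) 0 - (j : Int) else arr.getD j 0 := by
  induction ts generalizing s arr with
  | nil => simp [assignFrom_nil]
  | cons t ts ih =>
    rw [assignFrom_cons, PySem.List.pySetD_natCast]
    have : ((s : Int) + 1) = ((s + 1 : Nat) : Int) := by push_cast; ring
    rw [this, ih (s+1) (arr.set s (t - (s:Int))) (by simpa using hj)]
    by_cases hsj : s = j
    · subst hsj
      simp [List.getD_eq_getElem?_getD, hj]
    · have hset : (arr.set s (t - (s:Int))).getD j 0 = arr.getD j 0 := by
        simp [List.getD_eq_getElem?_getD, hsj]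
      by_cases hc : s + 1 ≤ j ∧ j - (s+1) < ts.length
      · have hc2 : s ≤ j ∧ j - s < (t :: ts).length := ⟨by omega, by simp; omega⟩
        rw [if_pos hc, if_pos hc2]
        have hEq : j - s = (j - (s+1)) + 1 := by omega
        rw [hEq]; simp
      · have hc2 : ¬ (s ≤ j ∧ j - s < (t :: ts).length) := by
          simp only [List.length_cons]; omega
        rw [if_neg hc, if_neg hc2, hset]

theorem fill_inner_eq (cnt : Nat) (c : Int) :
    ∀ (s u0 : Int) (arr : List Int),
    (PySem.List.pyRange s (s + cnt) 1).foldl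
        (fun st2 c2 => (c2, PySem.List.pySetD st2.2 c2 (c - c2))) (u0, arr)
      = (if cnt = 0 then u0 else s + cnt - 1, assignFrom arr s (List.replicate cnt c)) := by
  induction cnt with
  | zero => intro s u0 arr; simp [PySem.List.pyRange_one_eq_nil, assignFrom_nil]
  | succ n ih =>
    intro s u0 arr
    rw [PySem.List.pyRange_one_cons (by omega)]
    simp only [List.foldl_cons]
    have h1 : s + ((n+1 : Nat) : Int) = (s+1) + (n : Int) := by push_cast; ring
    rw [h1, ih (s+1) s (PySem.List.pySetD arr s (c - s))]
    have h2 : List.replicate (n+1) c = c :: List.replicate n c := rfl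
    rw [h2, assignFrom_cons]
    rcases Nat.eq_zero_or_pos n with h | h <;> first | (simp [h]; omega) | simp [h]

theorem assignFrom_append (arr : List Int) (s : Int) (ts1 ts2 : List Int) :
    assignFrom arr s (ts1 ++ ts2)
      = assignFrom (assignFrom arr s ts1) (s + ts1.length) ts2 := by
  simp [assignFrom, PySem.List.enumerate_append, List.foldl_append]

theorem fillLoopA_eq (ps : List (Int × Int)) :
    ∀ (u : Int) (arr : List Int), (∀ p ∈ ps, 0 ≤ p.2) →
    ps.foldl fillLoopA (u, arr)
      = (u + ((ps.flatMap (fun p => List.replicate p.2.toNat p.1)).length : Int),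
         assignFrom arr (u + 1) (ps.flatMap (fun p => List.replicate p.2.toNat p.1))) := by
  induction ps with
  | nil => intro u arr _; simp [assignFrom_nil]
  | cons p ps ih =>
    intro u arr hpos
    simp only [List.foldl_cons, List.flatMap_cons]
    by_cases hz : p.2 = 0
    · rw [show fillLoopA (u, arr) p = (u, arr) by simp [fillLoopA, hz]]
      rw [ih u arr (fun q hq => hpos q (List.mem_cons_of_mem _ hq))]
      simp [hz]
    · have hp2 : 0 < p.2 := lt_of_le_of_ne (hpos p (List.mem_cons_self)) (Ne.symm hz)
      have hfill : fillLoopA (u, arr) p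
          = (u + p.2, assignFrom arr (u + 1) (List.replicate p.2.toNat p.1)) := by
        rw [fillLoopA, if_neg hz]
        have h := fill_inner_eq p.2.toNat p.1 (u+1) (u+1) arr
        rw [show ((p.2.toNat : Int)) = p.2 from Int.toNat_of_nonneg hp2.le] at h
        show (PySem.List.pyRange (u+1) (u+1+p.2) 1).foldl
          (fun st2 c2 => (c2, PySem.List.pySetD st2.2 c2 (p.1 - c2))) (u+1, arr) = _
        rw [h, if_neg (by omega)]
        congr 1
        ring
      rw [hfill, ih _ _ (fun q hq => hpos q (List.mem_cons_of_mem _ hq))]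
      rw [assignFrom_append]
      have hlen : ((List.replicate p.2.toNat p.1).length : Int) = p.2 := by
        simp [Int.toNat_of_nonneg hp2.le]
      rw [Prod.mk.injEq]
      refine ⟨by simp only [List.length_append]; push_cast; omega, ?_⟩
      rw [hlen]
      ring_nf

theorem targetsB_mem (bc : List Int) (t : Int) (ht : t ∈ targetsB bc) :
    0 ≤ t ∧ t < (bc.length : Int) := by
  rcases List.mem_flatMap.1 ht with ⟨p, hp, hmem⟩
  rcases (PySem.List.mem_enumerate_iff bc 0 p).1 hp with ⟨k, hk, rfl⟩
  have := List.eq_of_mem_replicate hmem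
  subst this
  constructor <;> first | (simp; omega) | simp

theorem targetsB_length (bc : List Int) (h : ∀ x ∈ bc, 0 ≤ x) :
    ((targetsB bc).length : Int) = bc.sum := by
  have gen : ∀ (xs : List Int) (s : Int),
      ((PySem.List.enumerate xs s).flatMap (fun p => List.replicate p.2.toNat p.1)).length
        = (xs.map Int.toNat).sum := by
    intro xs
    induction xs with
    | nil => intro s; simp
    | cons x xs ih => intro s; simp [PySem.List.enumerate_cons, ih (s+1)]
  rw [targetsB, gen bc 0]
  induction bc with
  | nil => simp
  | cons x xs ih =>
    simp only [List.map_cons, List.sum_cons, Nat.cast_add]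
    rw [ih (fun y hy => h y (List.mem_cons_of_mem _ hy)),
      Int.toNat_of_nonneg (h x List.mem_cons_self)]

theorem maxD_abs_eq (xs : List Int) :
    |PySem.List.maxD xs (fun d => |d|) 0| = PySem.List.maxD (xs.map (fun d => |d|)) (fun y => y) 0 := by
  cases xs with
  | nil => simp [PySem.List.maxD, PySem.List.max?]
  | cons x t =>
    cases h : PySem.List.max? (x :: t) (fun d => |d|) with
    | none => exact absurd ((PySem.List.max?_eq_none_iff _ _).1 h) (by simp)
    | some m =>
      have hmem : m ∈ x :: t := PySem.List.max?_mem h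
      have hmax : ∀ y ∈ x :: t, |y| ≤ |m| := PySem.List.max?_isMax h
      have hid : PySem.List.max? ((x :: t).map (fun d => |d|)) (fun y => y)
          = some (List.foldl max |x| (t.map (fun d => |d|))) := by
        simp only [List.map_cons]
        exact PySem.List.max?_id_cons _ _
      rw [PySem.List.maxD, PySem.List.maxD, h, hid]
      simp only [Option.getD_some]
      have h1 := PySem.List.le_foldl_max (t.map (fun d => |d|)) |x|
      apply le_antisymm
      · rcases List.mem_cons.1 hmem with rfl | hm
        · exact h1.1
        · exact h1.2 _ (List.mem_map_of_mem hm)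
      · rcases PySem.List.foldl_max_mem (t.map (fun d => |d|)) |x| with he | he
        · rw [he]; exact hmax x List.mem_cons_self
        · rcases List.mem_map.1 he with ⟨y, hy, hye⟩
          rw [← hye]
          exact hmax y (List.mem_cons_of_mem _ hy)

theorem mkGrid_congr (rc C : Int) (f g : Int → Int → String)
    (h : ∀ r x, 0 ≤ r → r < rc → 0 ≤ x → x < C → f r x = g r x) :
    mkGrid rc C f = mkGrid rc C g := by
  unfold mkGrid
  apply List.map_congr_left
  intro r hr
  rcases (PySem.List.mem_pyRange_one).1 hr with ⟨hr0, hr1⟩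
  apply List.map_congr_left
  intro x hx
  rcases (PySem.List.mem_pyRange_one).1 hx with ⟨hx0, hx1⟩
  exact h r x hr0 hr1 hx0 hx1

theorem length_mkGrid (rc C : Int) (f : Int → Int → String) :
    (mkGrid rc C f).length = rc.toNat := by
  simp [mkGrid, PySem.List.length_pyRange_one]

theorem getElem_mkGrid (rc C : Int) (f : Int → Int → String) (i : Nat)
    (h : i < (mkGrid rc C f).length) :
    (mkGrid rc C f)[i] = (PySem.List.pyRange 0 C 1).map (fun x => f (i : Int) x) := by
  simp only [mkGrid] at *
  rw [List.getElem_map, PySem.List.getElem_pyRange_one]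
  simp

theorem mkGrid_write (rc C : Int) (f : Int → Int → String) (i j : Int) (s : String)
    (hi0 : 0 ≤ i) (hi : i < rc) (hj0 : 0 ≤ j) (hj : j < C) :
    PySem.List.pySetD (mkGrid rc C f) i
        (PySem.List.pySetD (PySem.List.pyGetD (mkGrid rc C f) i []) j s)
      = mkGrid rc C (fun r x => if r = i ∧ x = j then s else f r x) := by
  rw [PySem.List.pySetD_of_nonneg _ _ hi0, PySem.List.pyGetD_of_nonneg _ _ hi0]
  have hilen : i.toNat < (mkGrid rc C f).length := by
    rw [length_mkGrid]; omega
  have hgetD : (mkGrid rc C f).getD i.toNat []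
      = (PySem.List.pyRange 0 C 1).map (fun x => f i x) := by
    rw [List.getD_eq_getElem?_getD, List.getElem?_eq_getElem hilen, getElem_mkGrid]
    simp [Int.toNat_of_nonneg hi0]
  apply List.ext_getElem
  · simp [length_mkGrid]
  · intro r h1 h2
    rw [getElem_mkGrid _ _ _ _ h2, List.getElem_set]
    by_cases hri : i.toNat = r
    · rw [if_pos hri, hgetD, PySem.List.pySetD_of_nonneg _ _ hj0]
      apply List.ext_getElem
      · simp [PySem.List.length_pyRange_one]
      · intro x h3 h4
        rw [List.getElem_set, List.getElem_map, List.getElem_map,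
          PySem.List.getElem_pyRange_one]
        have hxlen : x < (C - 0).toNat := by
          simpa [PySem.List.length_pyRange_one] using h4
        by_cases hxj : j.toNat = x
        · rw [if_pos hxj, if_pos (by constructor <;> omega)]
        · rw [if_neg hxj, if_neg (by rintro ⟨hr', hx'⟩; omega)]
          have : i = (r : Int) := by omega
          rw [this]
    · rw [if_neg hri, getElem_mkGrid _ _ _ _ (by simpa [length_mkGrid] using h1)]
      apply List.map_congr_left
      intro x hx
      rcases (PySem.List.mem_pyRange_one).1 hx with ⟨hx0, hx1⟩
      rw [if_neg (by rintro ⟨hr', hx'⟩; omega)]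

theorem replicate_eq_mkGrid (rc C : Int) :
    List.replicate rc.toNat (List.replicate C.toNat ".") = mkGrid rc C (fun _ _ => ".") := by
  unfold mkGrid
  rw [PySem.List.pyRange_one, PySem.List.pyRange_one]
  apply List.ext_getElem
  · simp
  · intro i h1 h2
    simp [Function.comp_def, List.map_const']

theorem mark_inner_eq (rc C : Int) (k dx : Int) (sym : String) (e : Nat) (hrow : (e : Int) ≤ rc - 1)
    (hcolix : ∀ m : Nat, m < e → 0 ≤ k + dx * m ∧ k + dx * m < C) :
    ∀ (f : Int → Int → String),
    (PySem.List.pyRange 0 (e : Int) 1).foldl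
        (fun lay2 i =>
          PySem.List.pySetD lay2 i
            (PySem.List.pySetD (PySem.List.pyGetD lay2 i []) (k + dx * i) sym)) (mkGrid rc C f)
      = mkGrid rc C (fun r x => if r < (e : Int) ∧ x = k + dx * r then sym else f r x) := by
  induction e with
  | zero =>
    intro f
    rw [show ((0:Nat):Int) = 0 from rfl, PySem.List.pyRange_one_eq_nil (by omega)]
    simp only [List.foldl_nil]
    apply mkGrid_congr
    intro r x hr0 hr1 hx0 hx1
    rw [if_neg (by rintro ⟨h1, h2⟩; omega)]
  | succ n ih =>
    intro f
    have hcast : ((n+1 : Nat) : Int) = (n : Int) + 1 := by push_cast; ring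
    rw [hcast, PySem.List.pyRange_one_succ_right (by omega), List.foldl_append]
    rw [ih (by omega) (fun m hm => hcolix m (by omega)) f]
    simp only [List.foldl_cons, List.foldl_nil]
    rw [mkGrid_write rc C _ (n : Int) (k + dx * n) sym (by omega) (by omega)
      (hcolix n (by omega)).1 (hcolix n (by omega)).2]
    apply mkGrid_congr
    intro r x hr0 hr1 hx0 hx1
    by_cases hrn : r = (n : Int)
    · subst hrn
      by_cases hx : x = k + dx * (n : Int)
      · rw [if_pos ⟨rfl, hx⟩, if_pos ⟨by omega, hx⟩]
      · rw [if_neg (by rintro ⟨_, h2⟩; exact hx h2), if_neg (by rintro ⟨_, h2⟩; exact hx h2),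
          if_neg (by rintro ⟨h1, _⟩; omega)]
    · by_cases hr : r < (n : Int) ∧ x = k + dx * r
      · rw [if_neg (by rintro ⟨h1, _⟩; exact hrn h1), if_pos hr, if_pos ⟨by omega, hr.2⟩]
      · rw [if_neg (by rintro ⟨h1, _⟩; exact hrn h1), if_neg hr,
          if_neg (by rintro ⟨h1, h2⟩; exact hr ⟨by omega, h2⟩)]

def cellUpTo (col : List Int) (k : Nat) (r x : Int) : String :=
  if x + r < (k : Int) ∧ col.getD (x + r).toNat 0 < 0 ∧ r < -(col.getD (x + r).toNat 0) then "/"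
  else if 0 ≤ x - r ∧ x - r < (k : Int) ∧ 0 < col.getD (x - r).toNat 0 ∧
      r < col.getD (x - r).toNat 0 then "\\"
  else "."

theorem cellUpTo_succ_zero (col : List Int) (k : Nat) (hd : col.getD k 0 = 0)
    (r x : Int) (hr0 : 0 ≤ r) :
    cellUpTo col k r x = cellUpTo col (k+1) r x := by
  unfold cellUpTo
  push_cast
  by_cases h1 : x + r = (k : Int) <;> by_cases h2 : x - r = (k : Int)
  · rw [show (x+r).toNat = k by omega, show (x-r).toNat = k by omega, hd]
    split_ifs <;> first | rfl | (exfalso; omega)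
  · rw [show (x+r).toNat = k by omega, hd]
    generalize col.getD (x - r).toNat 0 = b
    split_ifs <;> first | rfl | (exfalso; omega)
  · rw [show (x-r).toNat = k by omega, hd]
    generalize col.getD (x + r).toNat 0 = a
    split_ifs <;> first | rfl | (exfalso; omega)
  · generalize col.getD (x + r).toNat 0 = a
    generalize col.getD (x - r).toNat 0 = b
    split_ifs <;> first | rfl | (exfalso; omega)

theorem cellUpTo_succ_pos (col : List Int) (k : Nat) (d : Int) (hd : col.getD k 0 = d)
    (hdpos : 0 < d) (r x : Int) (hr0 : 0 ≤ r) :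
    (if r < d ∧ x = (k : Int) + r then "\\" else cellUpTo col k r x)
      = cellUpTo col (k+1) r x := by
  unfold cellUpTo
  push_cast
  by_cases h1 : x + r = (k : Int) <;> by_cases h2 : x - r = (k : Int)
  · rw [show (x+r).toNat = k by omega, show (x-r).toNat = k by omega, hd]
    split_ifs <;> first | rfl | (exfalso; omega)
  · rw [show (x+r).toNat = k by omega, hd]
    generalize col.getD (x - r).toNat 0 = b
    split_ifs <;> first | rfl | (exfalso; omega)
  · rw [show (x-r).toNat = k by omega, hd]
    generalize col.getD (x + r).toNat 0 = a
    split_ifs <;> first | rfl | (exfalso; omega)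
  · generalize col.getD (x + r).toNat 0 = a
    generalize col.getD (x - r).toNat 0 = b
    split_ifs <;> first | rfl | (exfalso; omega)

theorem cellUpTo_succ_neg (col : List Int) (k : Nat) (d : Int) (hd : col.getD k 0 = d)
    (hdneg : d < 0) (r x : Int) (hr0 : 0 ≤ r) :
    (if r < -d ∧ x = (k : Int) - r then "/" else cellUpTo col k r x)
      = cellUpTo col (k+1) r x := by
  unfold cellUpTo
  push_cast
  by_cases h1 : x + r = (k : Int) <;> by_cases h2 : x - r = (k : Int)
  · rw [show (x+r).toNat = k by omega, show (x-r).toNat = k by omega, hd]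
    split_ifs <;> first | rfl | (exfalso; omega)
  · rw [show (x+r).toNat = k by omega, hd]
    generalize col.getD (x - r).toNat 0 = b
    split_ifs <;> first | rfl | (exfalso; omega)
  · rw [show (x-r).toNat = k by omega, hd]
    generalize col.getD (x + r).toNat 0 = a
    split_ifs <;> first | rfl | (exfalso; omega)
  · generalize col.getD (x + r).toNat 0 = a
    generalize col.getD (x - r).toNat 0 = b
    split_ifs <;> first | rfl | (exfalso; omega)

theorem floordiv_sign_pos (d : Int) (h : 0 < d) : PySem.Int.floordiv d |d| = 1 := by
  rw [abs_of_pos h, (PySem.Int.floordiv_eq_iff_of_pos h)]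
  constructor <;> nlinarith

theorem floordiv_sign_neg (d : Int) (h : d < 0) : PySem.Int.floordiv d |d| = -1 := by
  rw [abs_of_neg h, (PySem.Int.floordiv_eq_iff_of_pos (by omega))]
  constructor <;> nlinarith

theorem markLoopA_take (col : List Int) (rc C : Int)
    (hlen : (col.length : Int) = C)
    (hrc : ∀ j : Nat, j < col.length → |col.getD j 0| ≤ rc - 1)
    (hpos : ∀ j : Nat, j < col.length → 0 < col.getD j 0 → (j : Int) + col.getD j 0 ≤ C)
    (hneg : ∀ j : Nat, j < col.length → col.getD j 0 < 0 → -(col.getD j 0) ≤ (j : Int)) :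
    ∀ k, k ≤ col.length →
    (PySem.List.enumerate (col.take k)).foldl markLoopA (mkGrid rc C (fun _ _ => "."))
      = mkGrid rc C (cellUpTo col k) := by
  intro k
  induction k with
  | zero =>
    intro _
    simp only [List.take_zero, PySem.List.enumerate_nil, List.foldl_nil]
    apply mkGrid_congr
    intro r x hr0 hr1 hx0 hx1
    unfold cellUpTo
    rw [if_neg (by rintro ⟨h1, _⟩; omega), if_neg (by rintro ⟨_, h2, _⟩; omega)]
  | succ k ih =>
    intro hk1
    have hk : k < col.length := by omega
    have htake : col.take (k+1) = col.take k ++ [col[k]] := by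
      rw [List.take_add_one, List.getElem?_eq_getElem hk]
      rfl
    rw [htake, PySem.List.enumerate_append, List.foldl_append, ih (by omega)]
    have hlentake : ((col.take k).length : Int) = (k : Int) := by simp; omega
    simp only [hlentake, PySem.List.enumerate_cons, PySem.List.enumerate_nil,
      List.foldl_cons, List.foldl_nil, zero_add]
    have hdval : col.getD k 0 = col[k] := by
      rw [List.getD_eq_getElem?_getD, List.getElem?_eq_getElem hk]; rfl
    rcases lt_trichotomy col[k] 0 with hneg' | hzero | hpos'
    · -- negative column value: paints "/" up the left diagonal
      rw [markLoopA, if_neg (by omega)]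
      simp only
      rw [floordiv_sign_neg _ hneg', if_pos (by omega)]
      have hE : |col[k]| = ((-col[k]).toNat : Int) := by
        rw [abs_of_neg hneg']; omega
      rw [hE, mark_inner_eq rc C (k : Int) (-1) "/" (-col[k]).toNat
        (by have := hrc k hk; rw [hdval] at this; rw [abs_of_neg hneg'] at this; omega)
        (by intro m hm
            have h1 := hneg k hk (by omega)
            rw [hdval] at h1
            constructor <;> [omega; skip]
            have : (m : Int) < -col[k] := by omega
            omega)]
      apply mkGrid_congr
      intro r x hr0 hr1 hx0 hx1
      rw [← cellUpTo_succ_neg col k col[k] hdval hneg' r x hr0]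
      by_cases h : r < -col[k] ∧ x = (k : Int) - r
      · rw [if_pos (by constructor <;> omega), if_pos h]
      · rw [if_neg (by rintro ⟨h1, h2⟩; exact h ⟨by omega, by omega⟩), if_neg h]
    · rw [markLoopA, if_pos hzero]
      apply mkGrid_congr
      intro r x hr0 hr1 hx0 hx1
      exact cellUpTo_succ_zero col k (by rw [hdval, hzero]) r x hr0
    · -- positive column value: paints "\" down the right diagonal
      rw [markLoopA, if_neg (by omega)]
      simp only
      rw [floordiv_sign_pos _ hpos', if_neg (by omega)]
      have hE : |col[k]| = ((col[k]).toNat : Int) := by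
        rw [abs_of_pos hpos']; omega
      rw [hE, mark_inner_eq rc C (k : Int) 1 "\\" (col[k]).toNat
        (by have := hrc k hk; rw [hdval] at this; rw [abs_of_pos hpos'] at this; omega)
        (by intro m hm
            have h1 := hpos k hk (by omega)
            rw [hdval] at h1
            constructor
            · omega
            · have : (m : Int) < col[k] := by omega
              omega)]
      apply mkGrid_congr
      intro r x hr0 hr1 hx0 hx1
      rw [← cellUpTo_succ_pos col k col[k] hdval hpos' r x hr0]
      by_cases h : r < col[k] ∧ x = (k : Int) + r
      · rw [if_pos (by constructor <;> omega), if_pos h]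
      · rw [if_neg (by rintro ⟨h1, h2⟩; exact h ⟨by omega, by omega⟩), if_neg h]

theorem cellUpTo_full (col : List Int) (C : Int) (hlen : (col.length : Int) = C) (r x : Int)
    (hr : 0 ≤ r) (hx0 : 0 ≤ x) (hx : x < C) :
    cellUpTo col col.length r x = cellB C col r x := by
  unfold cellUpTo cellB
  rw [PySem.List.pyGetD_of_nonneg _ _ (by omega : (0:Int) ≤ x + r), hlen]
  by_cases h2 : 0 ≤ x - r
  · rw [PySem.List.pyGetD_of_nonneg _ _ h2]
    generalize col.getD (x + r).toNat 0 = a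
    generalize col.getD (x - r).toNat 0 = b
    split_ifs <;> first | rfl | (exfalso; omega)
  · generalize col.getD (x + r).toNat 0 = a
    generalize col.getD (x - r).toNat 0 = b
    generalize PySem.List.pyGetD col (x - r) 0 = b'
    split_ifs <;> first | rfl | (exfalso; omega)


-- ===== VERDICT (by name: the statement is the Claim_ definition above) =====
theorem solve_spec : Claim_equal_solve := by
  intro C bc _ hpre
  unfold Spec_solve
  obtain ⟨hne, hcase⟩ := hpre
  cases hhead : bc.head? with
  | none => exact absurd (List.head?_eq_none_iff.1 hhead) hne
  | some b0 =>
  cases hlast : bc.getLast? with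
  | none => exact absurd (List.getLast?_eq_none_iff.1 hlast) hne
  | some bl =>
  have e0 : PySem.List.pyGet? bc 0 = some b0 := by
    rw [PySem.List.pyGet?_zero, ← List.head?_eq_getElem?, hhead]
  have e1 : PySem.List.pyGet? bc (-1) = some bl := by
    rw [PySem.List.pyGet?_neg_one, hlast]
  rw [solve, solve_alt, e0, e1]
  simp only []
  by_cases hguard : b0 = 0 ∨ bl = 0
  · rw [if_pos hguard, if_pos hguard]
  · rw [if_neg hguard, if_neg hguard]
    rcases hcase with h | h | h
    · exact absurd (by rw [hhead] at h; exact (Option.some_inj.1 h)) (by tauto)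
    · exact absurd (by rw [hlast] at h; exact (Option.some_inj.1 h)) (by tauto)
    obtain ⟨hnn, hsum, hlenC⟩ := h
    -- column results agree
    have hennn : ∀ p ∈ PySem.List.enumerate bc, 0 ≤ p.2 := by
      intro p hp
      rcases (PySem.List.mem_enumerate_iff bc 0 p).1 hp with ⟨j, hj, rfl⟩
      exact hnn _ (List.getElem_mem hj)
    have hcol : ((PySem.List.enumerate bc).foldl fillLoopA (-1, List.replicate C.toNat 0)).2
        = colB C (targetsB bc) := by
      rw [fillLoopA_eq _ _ _ hennn]
      show assignFrom _ (-1 + 1) _ = _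
      rw [show (-1 : Int) + 1 = 0 from rfl]
      rfl
    rw [hcol, ← maxD_abs_eq]
    set col := colB C (targetsB bc) with hcoldef
    set rc := |PySem.List.maxD col (fun d => |d|) 0| + 1 with hrc
    -- facts about C, bc
    have hC1 : 1 ≤ C := by
      rcases bc with _ | ⟨a, tl⟩
      · exact absurd rfl hne
      · have ha : a = b0 := by simpa using hhead
        have h1 : 0 ≤ tl.sum := List.sum_nonneg (fun x hx => hnn x (List.mem_cons_of_mem _ hx))
        have h2 : 0 ≤ a := hnn a List.mem_cons_self
        have h3 : a ≠ 0 := by rw [ha]; tauto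
        have := List.sum_cons (a := a) (l := tl)
        omega
    have hlencol : (col.length : Int) = C := by
      rw [hcoldef, colB, show ((PySem.List.enumerate (targetsB bc)).foldl
        (fun arr p => PySem.List.pySetD arr p.1 (p.2 - p.1))
        (List.replicate C.toNat 0)) = assignFrom (List.replicate C.toNat 0) 0 (targetsB bc) from rfl,
        length_assignFrom]
      simp
      omega
    have hTlen : ((targetsB bc).length : Int) ≤ C := by
      rw [targetsB_length bc hnn]
      exact hsum
    have hjrep : ∀ j : Nat, j < col.length → j < (List.replicate C.toNat (0:Int)).length := by
      intro j hj
      rw [List.length_replicate]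
      omega
    have hcolget : ∀ j : Nat, j < col.length →
        col.getD j 0 = if j < (targetsB bc).length
          then (targetsB bc).getD j 0 - (j : Int) else 0 := by
      intro j hj
      have h := getD_assignFrom (targetsB bc) 0 (List.replicate C.toNat 0) j (hjrep j hj)
      rw [show ((0:Nat):Int) = 0 from rfl] at h
      rw [hcoldef, colB]
      show (assignFrom (List.replicate C.toNat 0) 0 (targetsB bc)).getD j 0 = _
      rw [h]
      simp only [Nat.zero_le, true_and, Nat.sub_zero]
      split_ifs with hc
      · rfl
      · exact List.getD_replicate _ (by have := hjrep j hj; simpa using this)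
    have hrcmax : ∀ j : Nat, j < col.length → |col.getD j 0| ≤ rc - 1 := by
      intro j hj
      cases hm : PySem.List.max? col (fun d => |d|) with
      | none =>
        have : col = [] := (PySem.List.max?_eq_none_iff _ _).1 hm
        rw [this] at hj; simp at hj
      | some m =>
        have := PySem.List.max?_isMax hm (col.getD j 0) (by
          rw [List.getD_eq_getElem?_getD, List.getElem?_eq_getElem hj]
          exact List.getElem_mem hj)
        rw [hrc, PySem.List.maxD, hm]
        simpa using this
    have hposP : ∀ j : Nat, j < col.length → 0 < col.getD j 0 → (j : Int) + col.getD j 0 ≤ C := by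
      intro j hj hp
      rw [hcolget j hj] at hp ⊢
      split_ifs with hc
      · have hmem : (targetsB bc).getD j 0 ∈ targetsB bc := by
          rw [List.getD_eq_getElem?_getD, List.getElem?_eq_getElem hc]
          exact List.getElem_mem hc
        have := (targetsB_mem bc _ hmem).2
        omega
      · rw [if_neg hc] at hp; omega
    have hnegP : ∀ j : Nat, j < col.length → col.getD j 0 < 0 → -(col.getD j 0) ≤ (j : Int) := by
      intro j hj hp
      rw [hcolget j hj] at hp ⊢
      split_ifs with hc
      · have hmem : (targetsB bc).getD j 0 ∈ targetsB bc := by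
          rw [List.getD_eq_getElem?_getD, List.getElem?_eq_getElem hc]
          exact List.getElem_mem hc
        have := (targetsB_mem bc _ hmem).1
        omega
      · rw [if_neg hc] at hp; omega
    -- layout
    have hlay : (PySem.List.enumerate col).foldl markLoopA
        (List.replicate rc.toNat (List.replicate C.toNat "."))
        = mkGrid rc C (cellB C col) := by
      rw [replicate_eq_mkGrid]
      have := markLoopA_take col rc C hlencol hrcmax hposP hnegP col.length (le_refl _)
      rw [List.take_length] at this
      rw [this]
      apply mkGrid_congr
      intro r x hr0 hr1 hx0 hx1
      exact cellUpTo_full col C hlencol r x hr0 hx0 hx1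
    rw [hlay]
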